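-- pv_equiv track=rewrite | github.com/sass/libsass-python | sass.py | and_join
-- ===== SOURCE A (Python) =====
-- def and_join(strings):
--     """Join the given ``strings`` by commas with last `' and '` conjuction.
--
--     >>> and_join(['Korea', 'Japan', 'China', 'Taiwan'])
--     'Korea, Japan, China, and Taiwan'
--
--     :param strings: a list of words to join
--     :type string: :class:`collections.Sequence`
--     :returns: a joined string
--     :rtype: :class:`str`, :class:`basestring`
--
--     """
--     last = len(strings) - 1
--     if last == 0:
--         return strings[0]
--     elif last < 0:
--         return ''
--     iterator = enumerate(strings)
--     return ', '.join('and ' + s if i == last else s for i, s in iterator)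
-- ===== SOURCE B (Python) =====
-- def and_join(strings):
--     if not strings:
--         return ''
--     if len(strings) == 1:
--         return strings[0]
--     return ', '.join(strings[:-1]) + ', and ' + strings[-1]
-- ===== Notes on version B (the rewrite author's own statement) =====
-- stated objective: simpler
-- what changed: Replaces the enumerate-based generator that conditionally prefixes 'and ' to the last element inside the join with a split decomposition: join all-but-last with ', ' and append ', and ' + last.
import Mathlib
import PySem

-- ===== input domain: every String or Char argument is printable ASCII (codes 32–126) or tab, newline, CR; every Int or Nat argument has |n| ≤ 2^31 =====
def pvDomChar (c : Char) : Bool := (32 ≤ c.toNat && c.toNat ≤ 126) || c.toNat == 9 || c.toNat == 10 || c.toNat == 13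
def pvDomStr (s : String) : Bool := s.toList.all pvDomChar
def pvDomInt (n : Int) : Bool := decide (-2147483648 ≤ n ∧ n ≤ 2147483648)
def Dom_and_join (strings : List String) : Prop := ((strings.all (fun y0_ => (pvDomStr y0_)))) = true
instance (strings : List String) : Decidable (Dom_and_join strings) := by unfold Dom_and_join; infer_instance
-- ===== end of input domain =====

-- B replaces A's enumerate-with-conditional-'and '-prefix join by the plainer split
-- "join all-but-last with ', ', then append ', and ' + last"; same output, simpler code.

-- ===== PORT A =====
def and_join (strings : List String) : String :=
  let last : Int := (strings.length : Int) - 1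
  if last = 0 then (PySem.List.pyGet? strings 0).getD ""   -- strings[0]; always in range here since len = 1
  else if last < 0 then ""
  else
    PySem.Str.join ", "
      ((PySem.List.enumerate strings).map (fun p => if p.1 = last then "and " ++ p.2 else p.2))

-- ===== PORT B =====
def and_join_alt (strings : List String) : String :=
  if strings = [] then ""
  else if strings.length = 1 then (PySem.List.pyGet? strings 0).getD ""   -- strings[0]; in range, len = 1
  else
    PySem.Str.join ", " (PySem.List.slice strings none (some (-1)))
      ++ ", and " ++ (PySem.List.pyGet? strings (-1)).getD ""   -- strings[-1]; in range, len ≥ 2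

-- ===== PRECONDITION & SPEC =====
def Spec_and_join (strings : List String) (out : String) : Prop := out = and_join_alt strings
instance (strings : List String) (out : String) : Decidable (Spec_and_join strings out) := by unfold Spec_and_join; infer_instance

-- ===== CLAIM (what is proved, stated in full; the proofs are below) =====
def Claim_equal_and_join : Prop := ∀ (strings : List String), Dom_and_join strings → Spec_and_join strings (and_join strings)

-- ===== LEMMAS AND PROOFS =====

theorem join_cons_ne (sep x : List Char) (L : List (List Char)) (h : L ≠ []) :
    PySem.Chars.join sep (x :: L) = x ++ sep ++ PySem.Chars.join sep L := by
  cases L with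
  | nil => exact absurd rfl h
  | cons q R => exact PySem.Chars.join_cons_cons sep x q R

-- A's conditional-prefix join over x :: xs ++ [y] (last index = s + |x :: xs|,
-- enumeration starting at s) equals B's split form.
theorem and_join_key (xs : List String) : ∀ (x y : String) (s : Int),
    PySem.Str.join ", "
      ((PySem.List.enumerate (x :: xs ++ [y]) s).map
        (fun p => if p.1 = s + ((x :: xs).length : Int) then "and " ++ p.2 else p.2))
    = PySem.Str.join ", " (x :: xs) ++ ", and " ++ y := by
  induction xs with
  | nil =>
    intro x y s
    apply String.toList_inj.mp
    simp [PySem.List.enumerate_cons, PySem.Str.toList_join, PySem.Chars.join_cons_cons,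
      PySem.Chars.join_singleton]
  | cons z zs ih =>
    intro x y s
    have h1 : ¬ ((s : Int) = (s + 1) + ((z :: zs).length : Int)) := by omega
    have h2 : (s + ((x :: z :: zs).length : Int)) = (s + 1) + ((z :: zs).length : Int) := by
      push_cast [List.length_cons]; ring
    apply String.toList_inj.mp
    rw [show x :: (z :: zs) ++ [y] = x :: (z :: zs ++ [y]) from rfl,
      PySem.List.enumerate_cons, List.map_cons, h2]
    have ih' := congrArg String.toList (ih z y (s + 1))
    simp only [PySem.Str.toList_join, List.map_cons] at ih' ⊢
    rw [if_neg h1]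
    rw [join_cons_ne _ _ _ (by simp [PySem.List.enumerate_cons]), ih']
    simp [PySem.Str.toList_join, PySem.Chars.join_cons_cons]

-- ===== VERDICT (by name: the statement is the Claim_ definition above) =====
theorem and_join_spec : Claim_equal_and_join := by
  intro strings _
  unfold Spec_and_join
  match strings with
  | [] => decide
  | [a] => simp [and_join, and_join_alt]
  | x :: b :: t =>
    rcases List.eq_nil_or_concat (b :: t) with h | ⟨xs, y, h⟩
    · simp at h
    · rw [List.concat_eq_append] at h
      rw [show x :: b :: t = x :: (b :: t) from rfl, h]
      have hlast : ((x :: (xs ++ [y])).length : Int) - 1 = 0 + ((x :: xs).length : Int) := by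
        simp
      unfold and_join and_join_alt
      simp only [hlast]
      rw [if_neg (show ¬ ((0:Int) + ((x :: xs).length : Int) = 0) by simp; omega)]
      rw [if_neg (show ¬ ((0:Int) + ((x :: xs).length : Int) < 0) by omega)]
      rw [show x :: (xs ++ [y]) = x :: xs ++ [y] from rfl]   -- reassociate for and_join_key
      simp only [and_join_key xs x y 0]
      rw [if_neg (by simp), if_neg (by simp)]
      rw [PySem.List.slice_to_neg_one, PySem.List.pyGet?_neg_one_append_singleton]
      have hd : (x :: (xs ++ [y])).dropLast = x :: xs := by
        rw [← List.cons_append, List.dropLast_concat]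
      simp [hd]
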